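-- pv_equiv track=rewrite | github.com/agustinlorenzoOBF/ALLITM25Repository | Ad-Hoc-Analysis-LT (Codes).py | eng
-- ===== SOURCE A (Python) =====
-- def eng(x):
--     customers_engaged = []
--     for j in range(6):
--         if all(x[:j+1])==True:
--             customers_engaged.append(1)
--         else:
--             customers_engaged.append(0)
--     return customers_engaged
-- ===== SOURCE B (Python) =====
-- def eng(x):
--     customers_engaged = []
--     engaged = True
--     for j in range(6):
--         if j < len(x):
--             engaged = engaged and bool(x[j])
--         customers_engaged.append(1 if engaged else 0)
--     return customers_engaged
-- ===== Notes on version B (the rewrite author's own statement) =====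
-- stated objective: simpler
-- what changed: Replaces the repeated all(x[:j+1]) prefix re-scans with a single forward pass carrying one running boolean accumulator.
import Mathlib
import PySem

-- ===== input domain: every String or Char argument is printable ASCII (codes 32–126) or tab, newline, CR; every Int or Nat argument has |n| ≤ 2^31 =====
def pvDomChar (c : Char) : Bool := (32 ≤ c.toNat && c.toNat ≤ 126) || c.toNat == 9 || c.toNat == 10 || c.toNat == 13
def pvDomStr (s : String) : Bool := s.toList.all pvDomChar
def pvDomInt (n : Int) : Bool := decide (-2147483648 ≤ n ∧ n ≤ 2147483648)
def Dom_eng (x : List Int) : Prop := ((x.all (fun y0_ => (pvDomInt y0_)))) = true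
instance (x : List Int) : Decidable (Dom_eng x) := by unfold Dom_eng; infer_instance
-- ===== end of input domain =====

-- B replaces A's repeated all(x[:j+1]) prefix re-scans with one pass carrying a running boolean (simpler).

-- ===== PORT A =====
def eng (x : List Int) : List Int :=
  (PySem.List.pyRange 0 6 1).foldl
    (fun acc j =>
      if ((PySem.List.slice x none (some (j + 1))).all (fun v => v ≠ 0)) = true
      then acc ++ [1] else acc ++ [0]) []

-- ===== PORT B =====
def eng_alt (x : List Int) : List Int :=
  ((PySem.List.pyRange 0 6 1).foldl
    (fun (s : Bool × List Int) j =>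
      let engaged := if j < (x.length : Int) then s.1 && (PySem.List.pyGetD x j 0 ≠ 0) else s.1
      (engaged, s.2 ++ [if engaged then 1 else 0])) (true, [])).2

-- ===== PRECONDITION & SPEC =====
def Spec_eng (x : List Int) (out : List Int) : Prop := out = eng_alt x
instance (x : List Int) (out : List Int) : Decidable (Spec_eng x out) := by unfold Spec_eng; infer_instance

-- ===== CLAIM (what is proved, stated in full; the proofs are below) =====
def Claim_equal_eng : Prop := ∀ (x : List Int), Dom_eng x → Spec_eng x (eng x)

-- ===== LEMMAS AND PROOFS =====

def pvFlags (x : List Int) (n : Nat) : List Int :=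
  (List.range n).map (fun k => if (x.take (k + 1)).all (fun v => v ≠ 0) then (1 : Int) else 0)

theorem pvFlags_succ (x : List Int) (n : Nat) :
    pvFlags x (n + 1)
      = pvFlags x n ++ [if (x.take (n + 1)).all (fun v => v ≠ 0) then (1 : Int) else 0] := by
  unfold pvFlags; rw [List.range_succ, List.map_append]; rfl

theorem pvA_char (x : List Int) (n : Nat) (a : List Int) :
    (PySem.List.pyRange 0 n 1).foldl
      (fun acc j =>
        if ((PySem.List.slice x none (some (j + 1))).all (fun v => v ≠ 0)) = true
        then acc ++ [1] else acc ++ [0]) a = a ++ pvFlags x n := by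
  induction n generalizing a with
  | zero => simp [pvFlags]
  | succ n ih =>
    rw [show ((n + 1 : Nat) : Int) = (n : Int) + 1 by push_cast; ring,
        PySem.List.pyRange_one_succ_right (by positivity), List.foldl_append, ih]
    have hc : ((n : Int) + 1) = (((n + 1 : Nat)) : Int) := by push_cast; ring
    simp only [List.foldl_cons, List.foldl_nil, hc, PySem.List.slice_to_natCast]
    rw [pvFlags_succ]
    cases hall : ((List.take (n + 1) x).all fun v => decide (v ≠ 0)) <;>
      simp [List.append_assoc]

theorem pvB_char (x : List Int) (n : Nat) (a : List Int) :
    (PySem.List.pyRange 0 n 1).foldl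
      (fun (s : Bool × List Int) j =>
        let engaged := if j < (x.length : Int) then s.1 && (PySem.List.pyGetD x j 0 ≠ 0) else s.1
        (engaged, s.2 ++ [if engaged then 1 else 0])) (true, a)
      = ((x.take n).all (fun v => v ≠ 0), a ++ pvFlags x n) := by
  induction n generalizing a with
  | zero => simp [pvFlags]
  | succ n ih =>
    rw [show ((n + 1 : Nat) : Int) = (n : Int) + 1 by push_cast; ring,
        PySem.List.pyRange_one_succ_right (by positivity), List.foldl_append, ih]
    simp only [List.foldl_cons, List.foldl_nil]
    by_cases h : n < x.length
    · have hlt : (n : Int) < (x.length : Int) := by exact_mod_cast h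
      have hget : PySem.List.pyGetD x (n : Int) 0 = x[n] := by
        rw [PySem.List.pyGetD_natCast]; exact List.getD_eq_getElem x 0 h
      have htake : x.take (n + 1) = x.take n ++ [x[n]] := by
        rw [List.take_add_one]; simp [List.getElem?_eq_getElem h]
      have hall : (x.take (n + 1)).all (fun v => decide (v ≠ 0))
          = ((x.take n).all (fun v => decide (v ≠ 0)) && decide (x[n] ≠ 0)) := by
        rw [htake, List.all_append, List.all_cons, List.all_nil, Bool.and_true]
      simp only [if_pos hlt, hget]
      rw [Prod.mk.injEq]
      refine ⟨by rw [hall], ?_⟩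
      rw [pvFlags_succ]
      show _ = a ++ (pvFlags x n ++ [if ((List.take (n + 1) x).all fun v => decide (v ≠ 0)) = true then (1:Int) else 0])
      rw [hall, List.append_assoc]
    · have hge : ¬ ((n : Int) < (x.length : Int)) := by omega
      have htake : x.take (n + 1) = x.take n := by
        rw [List.take_of_length_le (by omega), List.take_of_length_le (by omega)]
      simp only [if_neg hge]
      rw [Prod.mk.injEq]
      refine ⟨by rw [htake], ?_⟩
      rw [pvFlags_succ]
      show _ = a ++ (pvFlags x n ++ [if ((List.take (n + 1) x).all fun v => decide (v ≠ 0)) = true then (1:Int) else 0])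
      rw [htake, List.append_assoc]

-- ===== VERDICT (by name: the statement is the Claim_ definition above) =====
theorem eng_spec : Claim_equal_eng := by
  intro x _
  unfold Spec_eng eng eng_alt
  rw [show (6 : Int) = ((6 : Nat) : Int) by norm_num, pvA_char x 6 [], pvB_char x 6 []]
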